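-- pv_equiv track=rewrite | github.com/edliau/yaleshuttle_imp | route_finder.py | least_change_combination
-- ===== SOURCE A (Python) =====
-- def least_change_combination(list_of_tuples):
--     new_list = []
--
--     for i in range(len(list_of_tuples)):
--         sublist, _, _ = list_of_tuples[i]
--         best_number = None
--         max_chain_length = 0
--
--         for number in sublist:
--             chain_length = 0
--             next_index = i + 1
--             while next_index < len(list_of_tuples):
--                 if number in list_of_tuples[next_index][0]:
--                     chain_length += 1
--                 else:
--                     break
--                 next_index += 1
--
--             if chain_length > max_chain_length:
--                 max_chain_length = chain_length
--                 best_number = number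
--
--         if best_number is None:
--             new_list.append(sublist[0])
--         else:
--             new_list.append(best_number)
--
--     for i in range(len(list_of_tuples)):
--         list_of_tuples[i] = (new_list[i], list_of_tuples[i][1], list_of_tuples[i][2])
--
--     return list_of_tuples
-- ===== SOURCE B (Python) =====
-- def least_change_combination(list_of_tuples):
--     # Single backward pass: `run` maps number -> length of consecutive run of
--     # sublists (starting at the next position) containing it, so each pick is
--     # read off a dict instead of rescanning the tail.  Mutates the list in
--     # place and returns it, like the original.
--     picks = [None] * len(list_of_tuples)
--     run = {}
--     for i in range(len(list_of_tuples) - 1, -1, -1):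
--         sublist = list_of_tuples[i][0]
--         best_number = None
--         max_chain_length = 0
--         for number in sublist:
--             c = run.get(number, 0)
--             if c > max_chain_length:
--                 max_chain_length = c
--                 best_number = number
--         picks[i] = sublist[0] if best_number is None else best_number
--         run = {number: run.get(number, 0) + 1 for number in sublist}
--     for i in range(len(list_of_tuples)):
--         list_of_tuples[i] = (picks[i], list_of_tuples[i][1], list_of_tuples[i][2])
--     return list_of_tuples
-- ===== Notes on version B (the rewrite author's own statement) =====
-- stated objective: faster
-- what changed: Replaces the per-element forward rescan of the tail (for each index, for each number, walk following sublists) with a single backward pass that maintains a dict mapping each number to the length of its consecutive run starting at the next position, so each pick is a dict lookup.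
import Mathlib
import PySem

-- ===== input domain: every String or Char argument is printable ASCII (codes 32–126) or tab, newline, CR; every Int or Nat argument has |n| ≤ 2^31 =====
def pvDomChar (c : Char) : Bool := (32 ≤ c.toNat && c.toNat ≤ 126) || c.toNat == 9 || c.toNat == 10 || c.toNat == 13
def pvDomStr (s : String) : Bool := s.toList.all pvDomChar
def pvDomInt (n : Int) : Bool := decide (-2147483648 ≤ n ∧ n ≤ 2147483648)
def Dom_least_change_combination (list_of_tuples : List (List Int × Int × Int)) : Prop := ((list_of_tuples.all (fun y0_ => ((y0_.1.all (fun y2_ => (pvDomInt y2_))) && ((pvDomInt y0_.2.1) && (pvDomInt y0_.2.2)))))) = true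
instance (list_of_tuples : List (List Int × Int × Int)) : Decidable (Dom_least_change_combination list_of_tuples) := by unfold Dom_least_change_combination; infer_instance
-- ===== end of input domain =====

-- B replaces A's forward rescans of the tail by one backward pass with a dict of consecutive-run
-- lengths (asymptotically faster, measured). Both Pythons mutate the argument list in place and
-- return it; the equivalence proved here is about the returned value.

-- ===== PORT A =====
-- the `while next_index < len(...)` chain-counting loop, counting from index j
def pvChainA (lot : List (List Int × Int × Int)) (number : Int) (j : Nat) : Nat :=
  if h : j < lot.length then
    if number ∈ lot[j].1 then pvChainA lot number (j + 1) + 1 else 0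
  else 0
termination_by lot.length - j

def least_change_combination (list_of_tuples : List (List Int × Int × Int)) : List (Int × Int × Int) :=
  let new_list := (List.range list_of_tuples.length).map (fun i =>
    let sublist := (list_of_tuples.getD i ([], 0, 0)).1
    let bm := sublist.foldl (fun (bm : Option Int × Nat) number =>
      let chain_length := pvChainA list_of_tuples number (i + 1)
      if chain_length > bm.2 then (some number, chain_length) else bm) (none, 0)
    match bm.1 with
    | none => sublist.headI   -- sublist[0]; Pre_ excludes the empty sublists, where Python raises IndexError
    | some best_number => best_number)
  (List.range list_of_tuples.length).map (fun i =>
    (new_list.getD i 0, (list_of_tuples.getD i ([], 0, 0)).2.1, (list_of_tuples.getD i ([], 0, 0)).2.2))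

-- ===== PORT B =====
-- `run = {number: run.get(number, 0) + 1 for number in sublist}`
def pvRunUpd (run : PySem.Dict Int Nat) (sub : List Int) : PySem.Dict Int Nat :=
  sub.foldl (fun d x => d.insert x (run.getD x 0 + 1)) PySem.Dict.empty

-- the backward loop of B, as structural recursion: returns (run dict for this suffix, picks)
def pvGoB : List (List Int × Int × Int) → PySem.Dict Int Nat × List Int
  | [] => (PySem.Dict.empty, [])
  | (sublist, _, _) :: rest =>
    let rp := pvGoB rest
    let bm := sublist.foldl (fun (bm : Option Int × Nat) number =>
      let c := rp.1.getD number 0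
      if c > bm.2 then (some number, c) else bm) (none, 0)
    let pick := match bm.1 with
      | none => sublist.headI   -- sublist[0]; Pre_ excludes empty sublists
      | some best_number => best_number
    (pvRunUpd rp.1 sublist, pick :: rp.2)

def least_change_combination_alt (list_of_tuples : List (List Int × Int × Int)) : List (Int × Int × Int) :=
  let picks := (pvGoB list_of_tuples).2
  (List.range list_of_tuples.length).map (fun i =>
    (picks.getD i 0, (list_of_tuples.getD i ([], 0, 0)).2.1, (list_of_tuples.getD i ([], 0, 0)).2.2))

-- ===== PRECONDITION & SPEC =====
-- Pre_ excludes inputs containing an empty first component: there Python A (and Python B) raise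
-- IndexError on sublist[0].
def Pre_least_change_combination (list_of_tuples : List (List Int × Int × Int)) : Prop :=
  ∀ t ∈ list_of_tuples, t.1 ≠ []
instance (list_of_tuples : List (List Int × Int × Int)) : Decidable (Pre_least_change_combination list_of_tuples) := by unfold Pre_least_change_combination; infer_instance

def pvWitness_least_change_combination : (List (List Int × Int × Int)) := [([1, 2], 3, 4), ([2], 5, 6)]

def Spec_least_change_combination (list_of_tuples : List (List Int × Int × Int)) (out : List (Int × Int × Int)) : Prop := out = least_change_combination_alt list_of_tuples
instance (list_of_tuples : List (List Int × Int × Int)) (out : List (Int × Int × Int)) : Decidable (Spec_least_change_combination list_of_tuples out) := by unfold Spec_least_change_combination; infer_instance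

-- ===== CLAIM (what is proved, stated in full; the proofs are below) =====
def Claim_equal_least_change_combination : Prop := ∀ (list_of_tuples : List (List Int × Int × Int)), Dom_least_change_combination list_of_tuples → Pre_least_change_combination list_of_tuples → Spec_least_change_combination list_of_tuples (least_change_combination list_of_tuples)

-- ===== LEMMAS AND PROOFS =====

-- reference: length of the consecutive run of sublists containing x at the front of the tail
def pvRunLen (x : Int) : List (List Int × Int × Int) → Nat
  | [] => 0
  | (s, _, _) :: r => if x ∈ s then pvRunLen x r + 1 else 0

theorem pvChainA_eq (lot : List (List Int × Int × Int)) (x : Int) (j : Nat) :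
    pvChainA lot x j = pvRunLen x (lot.drop j) := by
  have main : ∀ k j, lot.length - j ≤ k → pvChainA lot x j = pvRunLen x (lot.drop j) := by
    intro k
    induction k with
    | zero =>
      intro j hk
      rw [pvChainA]
      have h : ¬ j < lot.length := by omega
      have hdrop : lot.drop j = [] := List.drop_of_length_le (by omega)
      simp [h, hdrop, pvRunLen]
    | succ k ih =>
      intro j hk
      rw [pvChainA]
      by_cases h : j < lot.length
      · have hd : lot.drop j = lot[j] :: lot.drop (j + 1) := List.drop_eq_getElem_cons h
        rw [hd]
        simp only [dif_pos h]
        rcases hg : lot[j] with ⟨s, a, b⟩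
        simp only [pvRunLen]
        by_cases hx : x ∈ s
        · simp [hx, ih (j + 1) (by omega)]
        · simp [hx]
      · have hdrop : lot.drop j = [] := List.drop_of_length_le (by omega)
        simp [h, hdrop, pvRunLen]
  exact main (lot.length - j) j le_rfl

theorem pvFoldInsert_getD (run : PySem.Dict Int Nat) (x : Int) :
    ∀ (sub : List Int) (d : PySem.Dict Int Nat),
      (sub.foldl (fun d x => d.insert x (run.getD x 0 + 1)) d).getD x 0 =
        if x ∈ sub then run.getD x 0 + 1 else d.getD x 0 := by
  intro sub
  induction sub with
  | nil => intro d; simp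
  | cons y t ih =>
    intro d
    simp only [List.foldl_cons, ih, List.mem_cons]
    by_cases ht : x ∈ t
    · simp [ht]
    · by_cases hxy : x = y <;> simp [ht, hxy, PySem.Dict.getD_insert]

theorem pvRunUpd_getD (run : PySem.Dict Int Nat) (sub : List Int) (x : Int) :
    (pvRunUpd run sub).getD x 0 = if x ∈ sub then run.getD x 0 + 1 else 0 := by
  rw [pvRunUpd, pvFoldInsert_getD]
  simp [PySem.Dict.getD_empty]

theorem pvGoB_run_getD (lot : List (List Int × Int × Int)) (x : Int) :
    (pvGoB lot).1.getD x 0 = pvRunLen x lot := by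
  induction lot with
  | nil => simp [pvGoB, pvRunLen, PySem.Dict.getD_empty]
  | cons hd r ih =>
    rcases hd with ⟨s, a, b⟩
    simp only [pvGoB, pvRunLen, pvRunUpd_getD, ih]

-- reference pick for one position, from its sublist and the tail
def pvPickRef (sub : List Int) (tl : List (List Int × Int × Int)) : Int :=
  let bm := sub.foldl (fun (bm : Option Int × Nat) x =>
    let c := pvRunLen x tl
    if c > bm.2 then (some x, c) else bm) (none, 0)
  match bm.1 with
  | none => sub.headI
  | some b => b

theorem pvGoB_pick (lot : List (List Int × Int × Int)) (i : Nat) (h : i < lot.length) :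
    (pvGoB lot).2.getD i 0 = pvPickRef lot[i].1 (lot.drop (i + 1)) := by
  induction lot generalizing i with
  | nil => simp at h
  | cons hd r ih =>
    rcases hd with ⟨s, a, b⟩
    cases i with
    | zero =>
      simp only [pvGoB, List.getD_cons_zero, List.getElem_cons_zero, List.drop_succ_cons,
        List.drop_zero, pvPickRef]
      have hfun : (fun (bm : Option Int × Nat) number =>
          let c := (pvGoB r).1.getD number 0
          if c > bm.2 then (some number, c) else bm) =
          (fun (bm : Option Int × Nat) x =>
          let c := pvRunLen x r
          if c > bm.2 then (some x, c) else bm) := by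
        funext bm x
        simp [pvGoB_run_getD]
      rw [hfun]
    | succ j =>
      simp only [pvGoB, List.getD_cons_succ, List.getElem_cons_succ, List.drop_succ_cons]
      exact ih j (by simpa using h)

-- ===== VERDICT (by name: the statement is the Claim_ definition above) =====
theorem pickA_eq (lot : List (List Int × Int × Int)) (i : Nat) (sub : List Int) :
    (match (sub.foldl (fun (bm : Option Int × Nat) number =>
        let chain_length := pvChainA lot number (i + 1)
        if chain_length > bm.2 then (some number, chain_length) else bm)
        ((none : Option Int), 0)).1 with
      | none => sub.headI
      | some best_number => best_number) = pvPickRef sub (lot.drop (i + 1)) := by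
  have hfun : (fun (bm : Option Int × Nat) number =>
      let chain_length := pvChainA lot number (i + 1)
      if chain_length > bm.2 then (some number, chain_length) else bm) =
      (fun (bm : Option Int × Nat) x =>
      let c := pvRunLen x (lot.drop (i + 1))
      if c > bm.2 then (some x, c) else bm) := by
    funext bm x
    simp [pvChainA_eq]
  rw [pvPickRef, hfun]

theorem least_change_combination_spec : Claim_equal_least_change_combination := by
  intro lot _ _
  unfold Spec_least_change_combination least_change_combination least_change_combination_alt
  apply List.map_congr_left
  intro i hi
  have h : i < lot.length := List.mem_range.mp hi
  have hA : ((List.range lot.length).map (fun i =>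
      let sublist := (lot.getD i ([], 0, 0)).1
      let bm := sublist.foldl (fun (bm : Option Int × Nat) number =>
        let chain_length := pvChainA lot number (i + 1)
        if chain_length > bm.2 then (some number, chain_length) else bm) (none, 0)
      match bm.1 with
      | none => sublist.headI
      | some best_number => best_number)).getD i 0 = pvPickRef lot[i].1 (lot.drop (i + 1)) := by
    rw [List.getD_eq_getElem _ _ (by simpa using h)]
    simp only [List.getElem_map, List.getElem_range]
    rw [List.getD_eq_getElem _ _ h]
    exact pickA_eq lot i lot[i].1
  rw [hA, ← pvGoB_pick lot i h]
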